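-- pv_equiv track=rewrite | github.com/NelsonAlmeida-18/POO | Ficha2/teste.py | formula1
-- ===== SOURCE A (Python) =====
-- def formula1(log):
--     dicOfTimes={}
--     for time,name in log:
--         if name not in dicOfTimes:
--             dicOfTimes[name]=[time]
--         else:
--             dicOfTimes[name].append(time)
--     loggerFinal=[]
--
--     for name in dicOfTimes:
--         fastestLap=dicOfTimes[name][0]
--         previousLap=0
--         for lap in dicOfTimes[name]:
--             if (lap-previousLap<fastestLap):
--                 fastestLap=lap-previousLap
--             previousLap=lap
--         loggerFinal.append((name,fastestLap))
--
--     _,minTime=min(loggerFinal,key=lambda item:item[1])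
--
--     best=[]
--
--     for name,time in loggerFinal:
--         if time==minTime:
--             best.append(name)
--
--     return sorted(best)
-- ===== SOURCE B (Python) =====
-- def formula1(log):
--     # single pass: name -> (last lap time, best gap so far)
--     rec = {}
--     for time, name in log:
--         if name in rec:
--             last, best = rec[name]
--             gap = time - last
--             rec[name] = (time, gap if gap < best else best)
--         else:
--             rec[name] = (time, time)  # first gap = time - 0
--     overall = min(best for _, best in rec.values())
--     return sorted(name for name, (_, best) in rec.items() if best == overall)
-- ===== Notes on version B (the rewrite author's own statement) =====
-- stated objective: simpler
-- what changed: Replaces the group-by-name dict of full time lists plus a second per-name inner loop and an intermediate (name,fastest) list with one pass over the log maintaining only (last_time, best_gap) per name, then a plain min over the bests.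
-- outside the precondition, e.g. on formula1([]): A raises ValueError, B raises ValueError
import Mathlib
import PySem

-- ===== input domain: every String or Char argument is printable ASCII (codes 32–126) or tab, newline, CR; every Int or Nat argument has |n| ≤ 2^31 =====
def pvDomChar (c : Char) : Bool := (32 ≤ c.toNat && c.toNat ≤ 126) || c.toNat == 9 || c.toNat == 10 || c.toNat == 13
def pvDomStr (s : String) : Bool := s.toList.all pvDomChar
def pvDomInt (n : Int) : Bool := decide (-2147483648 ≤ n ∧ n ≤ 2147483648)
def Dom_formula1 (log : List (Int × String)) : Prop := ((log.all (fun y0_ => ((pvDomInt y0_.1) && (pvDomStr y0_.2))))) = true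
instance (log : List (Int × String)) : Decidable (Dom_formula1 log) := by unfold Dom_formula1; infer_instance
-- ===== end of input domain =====

-- B replaces A's per-name time-list dict plus second pass of inner loops with a single pass
-- keeping only (last lap, best gap) per name (objective: simpler).

-- ===== PORT A =====
-- literal port of A: group all times per name, then re-scan each list with (fastestLap, previousLap),
-- then min by second component, then collect ties and sort.
-- (dicOfTimes[name][0] is ported as headD 0: every stored list is nonempty, so this is exact.)
def formula1 (log : List (Int × String)) : List String :=
  let dicOfTimes : PySem.Dict String (List Int) :=
    log.foldl (fun d p =>
      if d.contains p.2 = false then d.insert p.2 [p.1]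
      else d.insert p.2 (d.getD p.2 [] ++ [p.1])) PySem.Dict.empty
  let loggerFinal : List (String × Int) :=
    dicOfTimes.items.foldl (fun acc nl =>
      acc ++ [(nl.1, (nl.2.foldl
        (fun s lap => (if lap - s.2 < s.1 then lap - s.2 else s.1, lap))
        (nl.2.headD 0, 0)).1)]) []
  match PySem.List.min? loggerFinal (fun item => item.2) with
  | none => []  -- Python's min([]) raises ValueError here; excluded by Pre_ (log ≠ [])
  | some m =>
    let minTime := m.2
    let best := loggerFinal.foldl (fun acc p =>
      if p.2 == minTime then acc ++ [p.1] else acc) []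
    PySem.List.sorted best (fun x => x)

-- ===== PORT B =====
-- literal port of Source B: one pass keeping name -> (last time, best gap), then min of the bests.
def formula1_alt (log : List (Int × String)) : List String :=
  let rec_ : PySem.Dict String (Int × Int) :=
    log.foldl (fun d p =>
      match d.get? p.2 with
      | some lb => d.insert p.2 (p.1, if p.1 - lb.1 < lb.2 then p.1 - lb.1 else lb.2)
      | none => d.insert p.2 (p.1, p.1)) PySem.Dict.empty
  match PySem.List.min? (rec_.values.map (fun v => v.2)) (fun x => x) with
  | none => []  -- Python's min of an empty generator raises ValueError; excluded by Pre_
  | some overall =>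
    PySem.List.sorted
      ((rec_.items.filter (fun q => q.2.2 == overall)).map (fun q => q.1)) (fun x => x)

-- ===== PRECONDITION & SPEC =====
-- Pre_ excludes only the empty log, on which Python's min([]) raises ValueError (in A and in B).
def Pre_formula1 (log : List (Int × String)) : Prop := log ≠ []
instance (log : List (Int × String)) : Decidable (Pre_formula1 log) := by unfold Pre_formula1; infer_instance
def pvWitness_formula1 : (List (Int × String)) := [(7, "ham"), (12, "ham"), (9, "ver")]

def Spec_formula1 (log : List (Int × String)) (out : List String) : Prop := out = formula1_alt log
instance (log : List (Int × String)) (out : List String) : Decidable (Spec_formula1 log out) := by unfold Spec_formula1; infer_instance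

-- ===== CLAIM (what is proved, stated in full; the proofs are below) =====
def Claim_equal_formula1 : Prop := ∀ (log : List (Int × String)), Dom_formula1 log → Pre_formula1 log → Spec_formula1 log (formula1 log)

-- ===== LEMMAS AND PROOFS =====

-- A's inner loop step and its fold over one name's lap list
def pvStep (s : Int × Int) (lap : Int) : Int × Int :=
  (if lap - s.2 < s.1 then lap - s.2 else s.1, lap)
def pvG (laps : List Int) : Int × Int := laps.foldl pvStep (laps.headD 0, 0)
-- B's stored record (last time, best gap) for a name whose laps are `laps`
def pvH (laps : List Int) : Int × Int := ((pvG laps).2, (pvG laps).1)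

def pvStepA (d : PySem.Dict String (List Int)) (p : Int × String) : PySem.Dict String (List Int) :=
  if d.contains p.2 = false then d.insert p.2 [p.1]
  else d.insert p.2 (d.getD p.2 [] ++ [p.1])

def pvStepB (d : PySem.Dict String (Int × Int)) (p : Int × String) : PySem.Dict String (Int × Int) :=
  match d.get? p.2 with
  | some lb => d.insert p.2 (p.1, if p.1 - lb.1 < lb.2 then p.1 - lb.1 else lb.2)
  | none => d.insert p.2 (p.1, p.1)

-- invariant: B's dict is A's dict with each lap list replaced by (last, best), lists nonempty
def pvInv (dA : PySem.Dict String (List Int)) (dB : PySem.Dict String (Int × Int)) : Prop :=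
  dB.items = dA.items.map (fun p => (p.1, pvH p.2)) ∧ ∀ p ∈ dA.items, p.2 ≠ []

lemma pvG_append (laps : List Int) (t : Int) (h : laps ≠ []) :
    pvG (laps ++ [t]) = pvStep (pvG laps) t := by
  cases laps with
  | nil => exact absurd rfl h
  | cons a l => simp [pvG, List.foldl_append]

lemma pvH_singleton (t : Int) : pvH [t] = (t, t) := by
  simp [pvH, pvG, pvStep]

lemma pvH_append (laps : List Int) (t : Int) (h : laps ≠ []) :
    pvH (laps ++ [t]) = (t, if t - (pvH laps).1 < (pvH laps).2 then t - (pvH laps).1 else (pvH laps).2) := by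
  simp [pvH, pvG_append laps t h, pvStep]

lemma pvInv_step (dA : PySem.Dict String (List Int)) (dB : PySem.Dict String (Int × Int))
    (p : Int × String) (h : pvInv dA dB) : pvInv (pvStepA dA p) (pvStepB dB p) := by
  obtain ⟨hitems, hne⟩ := h
  have hget : dB.get? p.2 = (dA.get? p.2).map pvH := by
    simp [PySem.Dict.get?, hitems, List.find?_map, Function.comp_def, Option.map_map]
  have hcont : dB.contains p.2 = dA.contains p.2 := by
    simp [PySem.Dict.contains, hitems, List.any_map, Function.comp_def]
  cases hc : dA.contains p.2 with
  | false =>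
    have hga : dA.get? p.2 = none := by
      rw [PySem.Dict.contains_eq_isSome_get?] at hc
      exact Option.not_isSome_iff_eq_none.mp (by simp [hc])
    have hgb : dB.get? p.2 = none := by rw [hget, hga]; rfl
    constructor
    · rw [show pvStepB dB p = dB.insert p.2 (p.1, p.1) by simp [pvStepB, hgb],
          show pvStepA dA p = dA.insert p.2 [p.1] by simp [pvStepA, hc]]
      rw [PySem.Dict.items_insert_of_not_contains _ _ (by rw [hcont]; exact hc),
          PySem.Dict.items_insert_of_not_contains _ _ hc]
      simp [hitems, pvH_singleton]
    · intro q hq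
      rw [show pvStepA dA p = dA.insert p.2 [p.1] by simp [pvStepA, hc]] at hq
      rw [PySem.Dict.items_insert_of_not_contains _ _ hc] at hq
      rcases List.mem_append.mp hq with hq | hq
      · exact hne q hq
      · simp at hq; subst hq; simp
  | true =>
    have hsome : (dA.get? p.2).isSome := by
      rw [← PySem.Dict.contains_eq_isSome_get?]; exact hc
    obtain ⟨laps, hga⟩ := Option.isSome_iff_exists.mp hsome
    have hmem : (p.2, laps) ∈ dA.items := PySem.Dict.mem_items_of_get?_eq_some _ hga
    have hlne : laps ≠ [] := hne _ hmem
    have hgb : dB.get? p.2 = some (pvH laps) := by rw [hget, hga]; rfl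
    have hgd : dA.getD p.2 [] = laps := PySem.Dict.getD_of_get?_eq_some _ [] hga
    have hA : pvStepA dA p = dA.insert p.2 (laps ++ [p.1]) := by simp [pvStepA, hc, hgd]
    have hB : pvStepB dB p = dB.insert p.2 (pvH (laps ++ [p.1])) := by
      simp [pvStepB, hgb, pvH_append laps p.1 hlne]
    constructor
    · rw [hA, hB,
          PySem.Dict.items_insert_of_contains _ _ (by rw [hcont]; exact hc),
          PySem.Dict.items_insert_of_contains _ _ hc]
      simp only [hitems, List.map_map]
      apply List.map_congr_left
      intro q _
      by_cases hq : q.1 = p.2 <;> simp [hq]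
    · intro q hq
      rw [hA, PySem.Dict.items_insert_of_contains _ _ hc] at hq
      obtain ⟨r, hr, hrq⟩ := List.mem_map.mp hq
      by_cases hr1 : r.1 = p.2
      · simp [hr1] at hrq; subst hrq; simp
      · simp [hr1] at hrq; subst hrq; exact hne r hr

lemma pvInv_fold (log : List (Int × String)) :
    ∀ (dA : PySem.Dict String (List Int)) (dB : PySem.Dict String (Int × Int)),
      pvInv dA dB → pvInv (log.foldl pvStepA dA) (log.foldl pvStepB dB) := by
  induction log with
  | nil => intro dA dB h; exact h
  | cons p l ih => intro dA dB h; exact ih _ _ (pvInv_step dA dB p h)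

-- min with the identity key over a mapped list is min by key, then mapped
lemma pv_min?_foldl {α : Type} (f : α → Int) (l : List α) (acc : Option α) :
    List.foldl (fun acc x => match acc with
      | none => some x
      | some m => if x < m then some x else some m) (acc.map f) (l.map f)
    = (List.foldl (fun acc x => match acc with
      | none => some x
      | some m => if f x < f m then some x else some m) acc l).map f := by
  induction l generalizing acc with
  | nil => rfl
  | cons a l ih =>
    cases acc with
    | none => simpa using ih (some a)
    | some m =>
      by_cases h : f a < f m
      · simpa [h] using ih (some a)
      · simpa [h] using ih (some m)

lemma pv_min?_map {α : Type} (f : α → Int) (l : List α) :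
    PySem.List.min? (l.map f) (fun x => x) = (PySem.List.min? l f).map f := by
  unfold PySem.List.min?
  convert pv_min?_foldl f l none using 2
  funext acc x
  cases acc <;> rfl

-- ===== VERDICT (by name: the statement is the Claim_ definition above) =====
theorem formula1_spec : Claim_equal_formula1 := by
  intro log _ _
  simp only [Spec_formula1, formula1, formula1_alt]
  obtain ⟨hitems, -⟩ := pvInv_fold log PySem.Dict.empty PySem.Dict.empty
    ⟨rfl, by intro q hq; simp [PySem.Dict.empty] at hq⟩
  have e1 : List.foldl (fun (d : PySem.Dict String (List Int)) (p : Int × String) =>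
      if d.contains p.2 = false then d.insert p.2 [p.1]
      else d.insert p.2 (d.getD p.2 [] ++ [p.1])) PySem.Dict.empty log
      = log.foldl pvStepA PySem.Dict.empty := rfl
  have e2 : List.foldl (fun (d : PySem.Dict String (Int × Int)) (p : Int × String) =>
      match d.get? p.2 with
      | some lb => d.insert p.2 (p.1, if p.1 - lb.1 < lb.2 then p.1 - lb.1 else lb.2)
      | none => d.insert p.2 (p.1, p.1)) PySem.Dict.empty log
      = log.foldl pvStepB PySem.Dict.empty := rfl
  rw [e1, e2]
  have hlog : (log.foldl pvStepA PySem.Dict.empty).items.foldl (fun acc nl =>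
      acc ++ [(nl.1, (nl.2.foldl
        (fun s lap => (if lap - s.2 < s.1 then lap - s.2 else s.1, lap))
        (nl.2.headD 0, 0)).1)]) []
      = (log.foldl pvStepA PySem.Dict.empty).items.map (fun p => (p.1, (pvH p.2).2)) :=
    PySem.List.foldl_append_singleton_eq_map _ _ []
  have hvals : (log.foldl pvStepB PySem.Dict.empty).values.map (fun v => v.2)
      = ((log.foldl pvStepA PySem.Dict.empty).items.map (fun p => (p.1, (pvH p.2).2))).map (fun q => q.2) := by
    simp [PySem.Dict.values, hitems, List.map_map, Function.comp_def]
  rw [hlog, hvals,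
      pv_min?_map (fun (q : String × Int) => q.2)
        ((log.foldl pvStepA PySem.Dict.empty).items.map (fun p => (p.1, (pvH p.2).2)))]
  cases hmin : PySem.List.min?
      ((log.foldl pvStepA PySem.Dict.empty).items.map (fun p => (p.1, (pvH p.2).2)))
      (fun q => q.2) with
  | none => rfl
  | some m =>
    simp only [Option.map_some]
    have hbest : ((log.foldl pvStepA PySem.Dict.empty).items.map (fun p => (p.1, (pvH p.2).2))).foldl
        (fun acc p => if p.2 == m.2 then acc ++ [p.1] else acc) []
        = [] ++ (((log.foldl pvStepA PySem.Dict.empty).items.map (fun p => (p.1, (pvH p.2).2))).filter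
            (fun p => p.2 == m.2)).map (fun p => p.1) :=
      PySem.List.foldl_append_if _ _ _ []
    rw [hbest]
    simp only [List.nil_append, hitems]
    congr 1
    simp [List.filter_map, List.map_map, Function.comp_def]
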